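-- pv_equiv track=rewrite | github.com/Masthanaiah-C/practice | c3.py | sequenc
-- ===== SOURCE A (Python) =====
-- def sequenc(org,chg,res):
--     j=0
--
--     for i in range(len(org)-1):
--         if (org[i]==chg[i]):
--             continue
--         else:
--             j=i+1
--             while(j<len(org)):
--                 if(org[i]==chg[j]):
--                     for k in range(i,j):
--                         res.append((k,k+1))
--                     if(j>1):
--                         for k in range(j-1,i,-1):
--                             res.append((k,k-1))
--                     k=list(chg)
--                     m=k[j]
--                     k[j]=k[i]
--                     k[i]=m
--                     chg=k
--                     return sequenc(org,chg,res)
--                 else: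
--                     j+=1
--     return res
-- ===== SOURCE B (Python) =====
-- def sequenc(org, chg, res):
--     n = len(org)
--     c = list(chg)
--     for i in range(n - 1):
--         if org[i] != c[i]:
--             seg = c[i + 1:n]
--             if org[i] in seg:
--                 j = i + 1 + seg.index(org[i])
--                 res += [(i + s, i + s + 1) for s in range(j - i)]
--                 res += [(j - 1 - s, j - 2 - s) for s in range(j - 1 - i)]
--                 c[i], c[j] = c[j], c[i]
--     return res
-- ===== Notes on version B (the rewrite author's own statement) =====
-- stated objective: faster
-- what changed: A restarts the whole scan from index 0 via recursion after every swap and re-searches with a hand-written while loop; B is a single left-to-right fold over range(n-1) on a working copy, locating the partner with a slice + list.index and emitting the move pairs arithmetically (each swap fixes position i for good, so A's restart is provably redundant, and A's 'if j>1' guard is a no-op).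
import Mathlib
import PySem

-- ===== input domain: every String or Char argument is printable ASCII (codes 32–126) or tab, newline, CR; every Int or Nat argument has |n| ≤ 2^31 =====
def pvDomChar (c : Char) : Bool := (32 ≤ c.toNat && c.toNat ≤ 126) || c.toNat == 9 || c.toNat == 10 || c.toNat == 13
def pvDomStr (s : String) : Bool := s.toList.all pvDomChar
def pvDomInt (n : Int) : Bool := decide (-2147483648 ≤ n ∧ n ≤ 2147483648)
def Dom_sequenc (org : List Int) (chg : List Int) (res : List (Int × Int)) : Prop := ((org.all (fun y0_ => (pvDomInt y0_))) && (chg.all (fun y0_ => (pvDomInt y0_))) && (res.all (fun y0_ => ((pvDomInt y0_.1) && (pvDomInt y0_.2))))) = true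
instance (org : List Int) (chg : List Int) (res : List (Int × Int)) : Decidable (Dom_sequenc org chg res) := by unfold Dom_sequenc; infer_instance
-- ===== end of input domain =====

-- B replaces A's restart-from-scratch recursion by a single left-to-right fold over a working
-- copy (each swap fixes position i for good, so rescanning the prefix is redundant).
-- Both A and B mutate `res` in place (append/extend) and return it; neither mutates the caller's chg.

-- ===== PORT A =====
-- inner `j=i+1; while j<len(org): if org[i]==chg[j]: … else: j += 1` linear search
def seqFind (org c : List Int) (oi : Int) (j : Nat) : Option Nat :=
  if j < org.length then
    if oi = c.getD j 0 then some j else seqFind org c oi (j + 1)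
  else none
termination_by org.length - j

-- `for k in range(i, j): res.append((k, k+1))`
def emitF (i j : Nat) : List (Int × Int) :=
  (PySem.List.pyRange (i : Int) (j : Int) 1).map (fun k => (k, k + 1))

-- `for k in range(j-1, i, -1): res.append((k, k-1))`
def emitR (i j : Nat) : List (Int × Int) :=
  (PySem.List.pyRange ((j : Int) - 1) (i : Int) (-1)).map (fun k => (k, k - 1))

-- `k = list(chg); m = k[j]; k[j] = k[i]; k[i] = m`
def swapKM (c : List Int) (i j : Nat) : List Int :=
  (c.set j (c.getD i 0)).set i (c.getD j 0)

-- the `for i in range(len(org)-1)` loop; a restart (`return sequenc(org, chg, res)`)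
-- consumes one unit of fuel (each restart swaps, and at most len(org) swaps can happen)
def seqAFor (f : Nat) (org chg : List Int) (res : List (Int × Int)) (i : Nat) :
    List (Int × Int) :=
  if _h : i + 1 < org.length then
    if org.getD i 0 = chg.getD i 0 then seqAFor f org chg res (i + 1)
    else
      match seqFind org chg (org.getD i 0) (i + 1) with
      | some j =>
          let res' := res ++ emitF i j ++ (if 1 < j then emitR i j else [])
          match f with
          | 0 => res'
          | f' + 1 => seqAFor f' org (swapKM chg i j) res' 0
      | none => seqAFor f org chg res (i + 1)
  else res
termination_by (f, org.length - i)
decreasing_by all_goals first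
  | (apply Prod.Lex.left; omega)
  | (apply Prod.Lex.right; omega)

def sequenc (org : List Int) (chg : List Int) (res : List (Int × Int)) : List (Int × Int) :=
  seqAFor org.length org chg res 0

-- ===== PORT B =====
-- loop body: on a mismatch, look for org[i] in the slice c[i+1:n]; if present, extend res by the
-- two arithmetic comprehensions and swap c[i], c[j]
def altStep (org : List Int) (st : List Int × List (Int × Int)) (i : Nat) :
    List Int × List (Int × Int) :=
  let c := st.1
  if org.getD i 0 ≠ c.getD i 0 then
    let seg := PySem.List.slice c (some ((i : Int) + 1)) (some (org.length : Int))
    match PySem.List.index? seg (org.getD i 0) with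
    | some t =>
        let j := i + 1 + t
        let fwd := (List.range (j - i)).map
          (fun s => (((i + s : Nat) : Int), ((i + s : Nat) : Int) + 1))
        let bck := (List.range (j - 1 - i)).map
          (fun s => (((j - 1 - s : Nat) : Int), ((j - 2 - s : Nat) : Int)))
        ((c.set i (c.getD j 0)).set j (c.getD i 0), st.2 ++ fwd ++ bck)
    | none => st
  else st

def sequenc_alt (org : List Int) (chg : List Int) (res : List (Int × Int)) :
    List (Int × Int) :=
  ((List.range (org.length - 1)).foldl (altStep org) (chg, res)).2

-- ===== PRECONDITION & SPEC =====
-- Pre_ excludes exactly the inputs on which A raises IndexError: those with chg shorter than org,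
-- except when chg is a rearrangement (equal multiset) of org's first len(chg) elements — there
-- every search succeeds before any out-of-range access and A returns normally.
def Pre_sequenc (org : List Int) (chg : List Int) (res : List (Int × Int)) : Prop :=
  org.length ≤ chg.length ∨
    (org.length = chg.length + 1 ∧
      (↑chg : Multiset Int) = (↑(org.take chg.length) : Multiset Int))
instance (org : List Int) (chg : List Int) (res : List (Int × Int)) :
    Decidable (Pre_sequenc org chg res) := by unfold Pre_sequenc; infer_instance

def pvWitness_sequenc : List Int × List Int × (List (Int × Int)) := ([1, 0, 2], [0, 1, 2], [])

def Spec_sequenc (org : List Int) (chg : List Int) (res : List (Int × Int)) (out : List (Int × Int)) : Prop := out = sequenc_alt org chg res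
instance (org : List Int) (chg : List Int) (res : List (Int × Int)) (out : List (Int × Int)) : Decidable (Spec_sequenc org chg res out) := by unfold Spec_sequenc; infer_instance

-- ===== CLAIM (what is proved, stated in full; the proofs are below) =====
def Claim_equal_sequenc : Prop := ∀ (org : List Int) (chg : List Int) (res : List (Int × Int)), Dom_sequenc org chg res → Pre_sequenc org chg res → Spec_sequenc org chg res (sequenc org chg res)


-- ===== LEMMAS AND PROOFS =====

-- B's fold, suspended at loop index i (proof-layer view of sequenc_alt)
def bFold (org c : List Int) (res : List (Int × Int)) (i : Nat) : List Int × List (Int × Int) :=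
  (List.range' i (org.length - 1 - i)).foldl (altStep org) (c, res)

-- positions already processed by A: matched, or their org value occurs nowhere to their right
def InvP (org c : List Int) (i : Nat) : Prop :=
  ∀ i' < i, org.getD i' 0 = c.getD i' 0 ∨
    ∀ t, i' < t → t < org.length → c.getD t 0 ≠ org.getD i' 0

-- boundary case len(chg) = len(org)-1: processed prefix fully matched, suffixes multiset-equal
def MInv (org c : List Int) (i : Nat) : Prop :=
  (∀ i' < i, org.getD i' 0 = c.getD i' 0) ∧
  (↑(c.drop i) : Multiset Int) = (↑((org.take (org.length - 1)).drop i) : Multiset Int)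

def Inv2 (org c : List Int) (i : Nat) : Prop :=
  InvP org c i ∧
    (org.length ≤ c.length ∨ (org.length = c.length + 1 ∧ MInv org c i))

-- ---- generic facts about A's search ----
lemma seqFind_none_iff (org c : List Int) (oi : Int) (j : Nat) :
    seqFind org c oi j = none ↔ ∀ t, j ≤ t → t < org.length → c.getD t 0 ≠ oi := by
  suffices H : ∀ k j, org.length - j ≤ k →
      (seqFind org c oi j = none ↔ ∀ t, j ≤ t → t < org.length → c.getD t 0 ≠ oi) from
    H (org.length - j) j le_rfl
  intro k
  induction k with
  | zero =>
      intro j hj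
      rw [seqFind, if_neg (by omega)]
      exact ⟨fun _ t ht htL => absurd htL (by omega), fun _ => rfl⟩
  | succ k ih =>
      intro j hj
      by_cases hjL : j < org.length
      · rw [seqFind, if_pos hjL]
        by_cases heq : oi = c.getD j 0
        · rw [if_pos heq]
          constructor
          · intro h; cases h
          · intro h; exact absurd heq.symm (h j le_rfl hjL)
        · rw [if_neg heq]
          rw [ih (j + 1) (by omega)]
          constructor
          · intro h t ht htL
            rcases Nat.eq_or_lt_of_le ht with rfl | ht'
            · exact fun hc => heq hc.symm
            · exact h t ht' htL
          · intro h t ht htL; exact h t (by omega) htL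
      · rw [seqFind, if_neg hjL]
        exact ⟨fun _ t ht htL => absurd htL (by omega), fun _ => rfl⟩

lemma seqFind_some (org c : List Int) (oi : Int) {j k : Nat}
    (h : seqFind org c oi j = some k) :
    j ≤ k ∧ k < org.length ∧ c.getD k 0 = oi := by
  revert h
  suffices H : ∀ m j, org.length - j ≤ m → seqFind org c oi j = some k →
      j ≤ k ∧ k < org.length ∧ c.getD k 0 = oi from H (org.length - j) j le_rfl
  intro m
  induction m with
  | zero =>
      intro j hj h
      rw [seqFind, if_neg (by omega)] at h
      cases h
  | succ m ih =>
      intro j hj h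
      by_cases hjL : j < org.length
      · rw [seqFind, if_pos hjL] at h
        by_cases heq : oi = c.getD j 0
        · rw [if_pos heq] at h
          cases h
          exact ⟨le_rfl, hjL, heq.symm⟩
        · rw [if_neg heq] at h
          obtain ⟨h1, h2, h3⟩ := ih (j + 1) (by omega) h
          exact ⟨by omega, h2, h3⟩
      · rw [seqFind, if_neg hjL] at h
        cases h

-- A's search as first-index search in the window c[j : len(org)]
lemma seqFind_eq_window (org cs : List Int) (x : Int) :
    ∀ (k j : Nat), org.length - j ≤ k → (org.length ≤ cs.length ∨ x ∈ cs.drop j) →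
    seqFind org cs x j =
      (PySem.List.index? ((cs.drop j).take (org.length - j)) x).map (fun t => j + t) := by
  intro k
  induction k with
  | zero =>
      intro j hj _
      rw [seqFind, if_neg (by omega)]
      have h0 : org.length - j = 0 := by omega
      rw [h0, List.take_zero]
      simp [PySem.List.index?_eq_idxOf?]
  | succ k ih =>
      intro j hj hmem
      by_cases hjn : j < org.length
      · have hjc : j < cs.length := by
          rcases hmem with h | hmem
          · omega
          · by_contra hcon
            push_neg at hcon
            rw [List.drop_eq_nil_of_le (by omega)] at hmem
            cases hmem
        have hdrop : cs.drop j = cs[j] :: cs.drop (j + 1) := List.drop_eq_getElem_cons hjc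
        have hwin : (cs.drop j).take (org.length - j)
            = cs[j] :: ((cs.drop (j + 1)).take (org.length - (j + 1))) := by
          rw [hdrop, show org.length - j = (org.length - (j + 1)) + 1 by omega,
            List.take_succ_cons]
        have hgd : cs.getD j 0 = cs[j] := List.getD_eq_getElem cs 0 hjc
        rw [seqFind, if_pos hjn]
        by_cases hx : x = cs.getD j 0
        · rw [if_pos hx, hwin]
          have : cs[j] = x := by rw [← hgd, hx]
          rw [this, PySem.List.index?_cons_self]
          simp
        · rw [if_neg hx]
          have hmem' : org.length ≤ cs.length ∨ x ∈ cs.drop (j + 1) := by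
            rcases hmem with h | hmem
            · exact Or.inl h
            · right
              rw [hdrop] at hmem
              rcases List.mem_cons.mp hmem with heq | h
              · exact absurd (heq.trans hgd.symm) hx
              · exact h
          rw [ih (j + 1) (by omega) hmem', hwin,
            PySem.List.index?_cons_of_ne _ (fun h => hx (h.symm.trans hgd.symm))]
          rw [Option.map_map]
          cases PySem.List.index? ((cs.drop (j + 1)).take (org.length - (j + 1))) x with
          | none => rfl
          | some t => simp [Function.comp]; omega
      · rw [seqFind, if_neg hjn]
        have h0 : org.length - j = 0 := by omega
        rw [h0, List.take_zero]
        simp [PySem.List.index?_eq_idxOf?]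

-- ---- the emitted move blocks coincide with B's arithmetic comprehensions ----
lemma emitF_eq (i j : Nat) :
    emitF i j = (List.range (j - i)).map
      (fun s => (((i + s : Nat) : Int), ((i + s : Nat) : Int) + 1)) := by
  unfold emitF
  rw [PySem.List.pyRange_one, List.map_map]
  have ht : ((j : Int) - (i : Int)).toNat = j - i := by omega
  rw [ht]
  apply List.map_congr_left
  intro s _
  simp only [Function.comp_apply, Prod.mk.injEq]
  constructor <;> push_cast <;> ring

lemma emitR_eq (i j : Nat) (hij : i < j) :
    emitR i j = (List.range (j - 1 - i)).map
      (fun s => (((j - 1 - s : Nat) : Int), ((j - 2 - s : Nat) : Int))) := by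
  unfold emitR
  rw [PySem.List.pyRange_neg_one, List.map_map]
  have ht : ((j : Int) - 1 - (i : Int)).toNat = j - 1 - i := by omega
  rw [ht]
  apply List.map_congr_left
  intro s hs
  rw [List.mem_range] at hs
  simp only [Function.comp_apply, Prod.mk.injEq]
  constructor <;> omega

lemma emitR_eq_nil {i j : Nat} (hij : i < j) (hj : j ≤ 1) : emitR i j = [] := by
  obtain rfl : j = 1 := by omega
  obtain rfl : i = 0 := by omega
  simp [emitR]

-- ---- the swap ----
lemma length_swapKM (c : List Int) (i j : Nat) : (swapKM c i j).length = c.length := by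
  simp [swapKM]

lemma getD_swapKM_i (c : List Int) {i : Nat} (j : Nat) (hi : i < c.length) :
    (swapKM c i j).getD i 0 = c.getD j 0 := by
  simp only [swapKM, List.getD_eq_getElem?_getD, List.getElem?_set, List.length_set,
    if_pos hi]
  rfl

lemma getD_swapKM_j (c : List Int) {i j : Nat} (hij : i ≠ j) (hj : j < c.length) :
    (swapKM c i j).getD j 0 = c.getD i 0 := by
  simp only [swapKM, List.getD_eq_getElem?_getD, List.getElem?_set, List.length_set]
  rw [if_neg hij]
  simp [hj]

lemma getD_swapKM_other (c : List Int) {i j t : Nat} (hti : t ≠ i) (htj : t ≠ j) :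
    (swapKM c i j).getD t 0 = c.getD t 0 := by
  simp [swapKM, List.getD_eq_getElem?_getD, Ne.symm hti, Ne.symm htj]

-- ---- multiset bookkeeping for the boundary case ----
lemma multiset_set (l : List Int) : ∀ (t : Nat) (w : Int) (ht : t < l.length),
    (↑(l.set t w) : Multiset Int) + {l[t]} = (↑l : Multiset Int) + {w} := by
  induction l with
  | nil => intro t w ht; simp at ht
  | cons a l ih =>
      intro t w ht
      cases t with
      | zero =>
          simp only [List.set, List.getElem_cons_zero, ← Multiset.cons_coe,
            ← Multiset.singleton_add]
          abel
      | succ t =>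
          have h := ih t w (by simpa using Nat.lt_of_succ_lt_succ ht)
          simp only [List.set, List.getElem_cons_succ, ← Multiset.cons_coe,
            ← Multiset.singleton_add]
          rw [add_assoc, add_assoc, h]

-- ---- invariants ----
lemma invP_of_prefix {org c : List Int} {i : Nat}
    (h : ∀ i' < i, org.getD i' 0 = c.getD i' 0) : InvP org c i :=
  fun i' hi' => Or.inl (h i' hi')

lemma invP_succ_of_match {org c : List Int} {i : Nat} (h : InvP org c i)
    (he : org.getD i 0 = c.getD i 0) : InvP org c (i + 1) := by
  intro i' hi'
  rcases Nat.lt_succ_iff_lt_or_eq.mp hi' with hlt | rfl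
  · exact h i' hlt
  · exact Or.inl he

lemma invP_succ_of_none {org c : List Int} {i : Nat} (h : InvP org c i)
    (hn : seqFind org c (org.getD i 0) (i + 1) = none) : InvP org c (i + 1) := by
  intro i' hi'
  rcases Nat.lt_succ_iff_lt_or_eq.mp hi' with hlt | rfl
  · exact h i' hlt
  · exact Or.inr fun t ht htL => (seqFind_none_iff org c _ _).mp hn t (by omega) htL

lemma invP_succ_of_swap {org c : List Int} {i j : Nat} (h : InvP org c i)
    (hlen : org.length ≤ c.length)
    (hs : seqFind org c (org.getD i 0) (i + 1) = some j) :
    InvP org (swapKM c i j) (i + 1) := by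
  obtain ⟨hij, hjL, hcj⟩ := seqFind_some org c _ hs
  have hiL : i < org.length := by omega
  have hic : i < c.length := by omega
  have hjc : j < c.length := by omega
  have hine : i ≠ j := by omega
  intro i' hi'
  rcases Nat.lt_succ_iff_lt_or_eq.mp hi' with hlt | rfl
  · rcases h i' hlt with hm | hno
    · left
      rw [getD_swapKM_other c (by omega) (by omega)]
      exact hm
    · right
      intro t ht htL
      by_cases hti : t = i
      · subst hti
        rw [getD_swapKM_i c j hic, hcj]
        intro hc
        exact hno j (by omega) hjL (hcj.trans hc)
      · by_cases htj : t = j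
        · subst htj
          rw [getD_swapKM_j c hine hjc]
          exact hno i (by omega) hiL
        · rw [getD_swapKM_other c hti htj]
          exact hno t ht htL
  · left
    rw [getD_swapKM_i c j hic, hcj]

lemma minv_match {org cs : List Int} {i : Nat} (hn : org.length = cs.length + 1)
    (hi1 : i + 1 < org.length) (hm : MInv org cs i)
    (heq : org.getD i 0 = cs.getD i 0) : MInv org cs (i + 1) := by
  obtain ⟨hpre, hmul⟩ := hm
  have hic : i < cs.length := by omega
  have hiT : i < (org.take (org.length - 1)).length := by
    simp [List.length_take]; omega
  refine ⟨?_, ?_⟩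
  · intro i' hi'
    rcases Nat.lt_succ_iff_lt_or_eq.mp hi' with hlt | rfl
    · exact hpre i' hlt
    · exact heq
  · have hdc : cs.drop i = cs[i] :: cs.drop (i + 1) := List.drop_eq_getElem_cons hic
    have hdT : (org.take (org.length - 1)).drop i
        = (org.take (org.length - 1))[i] :: (org.take (org.length - 1)).drop (i + 1) :=
      List.drop_eq_getElem_cons hiT
    rw [hdc, hdT, ← Multiset.cons_coe, ← Multiset.cons_coe] at hmul
    have hTi : (org.take (org.length - 1))[i] = org[i]'(by omega) := List.getElem_take
    have hci : cs[i] = (org.take (org.length - 1))[i] := by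
      rw [hTi, ← List.getD_eq_getElem cs 0 hic, ← heq, List.getD_eq_getElem org 0 (by omega)]
    rw [hci] at hmul
    exact (Multiset.cons_inj_right _).mp hmul

lemma minv_mem {org cs : List Int} {i : Nat} (hn : org.length = cs.length + 1)
    (hi1 : i + 1 < org.length) (hm : MInv org cs i)
    (hne : ¬ org.getD i 0 = cs.getD i 0) : org.getD i 0 ∈ cs.drop (i + 1) := by
  obtain ⟨_, hmul⟩ := hm
  have hic : i < cs.length := by omega
  have hiT : i < (org.take (org.length - 1)).length := by
    simp [List.length_take]; omega
  have hdT : (org.take (org.length - 1)).drop i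
      = (org.take (org.length - 1))[i] :: (org.take (org.length - 1)).drop (i + 1) :=
    List.drop_eq_getElem_cons hiT
  have hTi : (org.take (org.length - 1))[i] = org[i]'(by omega) := List.getElem_take
  have hmemT : org.getD i 0 ∈ (org.take (org.length - 1)).drop i := by
    rw [hdT, hTi, List.getD_eq_getElem org 0 (by omega)]
    exact List.mem_cons_self
  have hmemc : org.getD i 0 ∈ cs.drop i := by
    have : org.getD i 0 ∈ (↑(cs.drop i) : Multiset Int) := by
      rw [hmul]; exact Multiset.mem_coe.mpr hmemT
    exact Multiset.mem_coe.mp this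
  have hdc : cs.drop i = cs[i] :: cs.drop (i + 1) := List.drop_eq_getElem_cons hic
  rw [hdc] at hmemc
  rcases List.mem_cons.mp hmemc with heq | h
  · exact absurd (by rw [heq, List.getD_eq_getElem cs 0 hic]) hne
  · exact h

lemma minv_swap {org cs : List Int} {i j : Nat} (hn : org.length = cs.length + 1)
    (hi1 : i + 1 < org.length) (hij : i < j) (hjc : j < cs.length)
    (hm : MInv org cs i) (hcj : cs.getD j 0 = org.getD i 0) :
    MInv org (swapKM cs i j) (i + 1) := by
  obtain ⟨hpre, hmul⟩ := hm
  have hic : i < cs.length := by omega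
  have hiT : i < (org.take (org.length - 1)).length := by
    simp [List.length_take]; omega
  refine ⟨?_, ?_⟩
  · intro i' hi'
    rcases Nat.lt_succ_iff_lt_or_eq.mp hi' with hlt | rfl
    · rw [getD_swapKM_other cs (by omega) (by omega)]
      exact hpre i' hlt
    · rw [getD_swapKM_i cs j hic, hcj]
  · -- suffix multisets after the swap
    have hdropswap : (swapKM cs i j).drop (i + 1)
        = (cs.drop (i + 1)).set (j - (i + 1)) (cs.getD i 0) := by
      unfold swapKM
      rw [List.drop_set, if_pos (by omega), List.drop_set, if_neg (by omega)]
    have htlen : j - (i + 1) < (cs.drop (i + 1)).length := by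
      simp [List.length_drop]; omega
    have hgetj : (cs.drop (i + 1))[j - (i + 1)]'htlen = cs[j] := by
      rw [List.getElem_drop]
      congr 1
      omega
    have hset := multiset_set (cs.drop (i + 1)) (j - (i + 1)) (cs.getD i 0) htlen
    rw [hgetj] at hset
    have hdc : cs.drop i = cs[i] :: cs.drop (i + 1) := List.drop_eq_getElem_cons hic
    have hdT : (org.take (org.length - 1)).drop i
        = (org.take (org.length - 1))[i] :: (org.take (org.length - 1)).drop (i + 1) :=
      List.drop_eq_getElem_cons hiT
    have hTi : (org.take (org.length - 1))[i] = org[i]'(by omega) := List.getElem_take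
    rw [hdc, hdT, ← Multiset.cons_coe, ← Multiset.cons_coe, ← Multiset.singleton_add,
      ← Multiset.singleton_add, hTi] at hmul
    have hcjg : cs[j] = org[i]'(by omega) := by
      rw [← List.getD_eq_getElem cs 0 hjc, hcj, List.getD_eq_getElem org 0 (by omega)]
    have hcig : cs.getD i 0 = cs[i] := List.getD_eq_getElem cs 0 hic
    rw [hdropswap]
    have key : (↑((cs.drop (i + 1)).set (j - (i + 1)) (cs.getD i 0)) : Multiset Int)
          + {cs[j]}
        = (↑((org.take (org.length - 1)).drop (i + 1)) : Multiset Int) + {cs[j]} := by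
      rw [hset, hcig, hcjg]
      have : ({cs[i]} : Multiset Int) + ↑(cs.drop (i + 1))
          = {org[i]'(by omega)} + ↑((org.take (org.length - 1)).drop (i + 1)) := hmul
      calc (↑(cs.drop (i + 1)) : Multiset Int) + {cs[i]}
          = {cs[i]} + ↑(cs.drop (i + 1)) := add_comm _ _
        _ = {org[i]'(by omega)} + ↑((org.take (org.length - 1)).drop (i + 1)) := hmul
        _ = ↑((org.take (org.length - 1)).drop (i + 1)) + {org[i]'(by omega)} := add_comm _ _
    exact add_right_cancel key

-- ---- evaluating one step of B ----
lemma altStep_eq (org c : List Int) (res : List (Int × Int)) (i : Nat) :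
    altStep org (c, res) i =
      if org.getD i 0 = c.getD i 0 then (c, res)
      else
        match PySem.List.index? ((c.drop (i + 1)).take (org.length - (i + 1)))
            (org.getD i 0) with
        | none => (c, res)
        | some t =>
            (swapKM c i (i + 1 + t), res ++ emitF i (i + 1 + t) ++ emitR i (i + 1 + t))
        := by
  unfold altStep
  by_cases hm : org.getD i 0 = c.getD i 0
  · rw [if_neg (not_not_intro hm), if_pos hm]
  · rw [if_pos hm, if_neg hm]
    have hseg : PySem.List.slice c (some ((i : Int) + 1)) (some (org.length : Int))
        = (c.drop (i + 1)).take (org.length - (i + 1)) := by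
      have h1 : ((i : Int) + 1) = ((i + 1 : Nat) : Int) := by push_cast; ring
      rw [h1, PySem.List.slice_natCast]
    cases hidx : PySem.List.index? ((c.drop (i + 1)).take (org.length - (i + 1)))
        (org.getD i 0) with
    | none => simp only [hseg, hidx]
    | some t =>
        have hswap : (c.set i (c.getD (i + 1 + t) 0)).set (i + 1 + t) (c.getD i 0)
            = swapKM c i (i + 1 + t) := by
          unfold swapKM
          rw [List.set_comm _ _ (by omega)]
        have hfwd : (List.range (i + 1 + t - i)).map
              (fun s => (((i + s : Nat) : Int), ((i + s : Nat) : Int) + 1))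
            = emitF i (i + 1 + t) := (emitF_eq i (i + 1 + t)).symm
        have hbck : (List.range (i + 1 + t - 1 - i)).map
              (fun s => (((i + 1 + t - 1 - s : Nat) : Int), ((i + 1 + t - 2 - s : Nat) : Int)))
            = emitR i (i + 1 + t) := (emitR_eq i (i + 1 + t) (by omega)).symm
        simp only [hseg, hidx]
        rw [hswap, hfwd, hbck]

-- ---- unfolding B's fold ----
lemma bFold_stop (org c : List Int) (res : List (Int × Int)) (i : Nat)
    (h : ¬ i + 1 < org.length) : bFold org c res i = (c, res) := by
  unfold bFold
  rw [show org.length - 1 - i = 0 by omega]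
  rfl

lemma bFold_step (org c : List Int) (res : List (Int × Int)) (i : Nat)
    (h : i + 1 < org.length) :
    bFold org c res i
      = bFold org (altStep org (c, res) i).1 (altStep org (c, res) i).2 (i + 1) := by
  unfold bFold
  rw [show org.length - 1 - i = (org.length - 1 - (i + 1)) + 1 by omega,
    List.range'_succ, List.foldl_cons]

lemma seqA_skip (f : Nat) (org : List Int) : ∀ (k : Nat) (c : List Int)
    (res : List (Int × Int)) (i₀ i : Nat), i - i₀ ≤ k → i₀ ≤ i → InvP org c i →
    seqAFor f org c res i₀ = seqAFor f org c res i := by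
  intro k
  induction k with
  | zero =>
      intro c res i₀ i hk h0 _
      obtain rfl : i₀ = i := by omega
      rfl
  | succ k ih =>
      intro c res i₀ i hk h0 hinv
      rcases Nat.eq_or_lt_of_le h0 with rfl | hlt
      · rfl
      · have step : seqAFor f org c res i₀ = seqAFor f org c res (i₀ + 1) := by
          by_cases hL : i₀ + 1 < org.length
          · by_cases hm : org.getD i₀ 0 = c.getD i₀ 0
            · rw [seqAFor, dif_pos hL, if_pos hm]
            · rcases hinv i₀ hlt with hmm | hno
              · exact absurd hmm hm
              · have hnone : seqFind org c (org.getD i₀ 0) (i₀ + 1) = none :=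
                  (seqFind_none_iff org c _ _).mpr (fun t ht htL => hno t (by omega) htL)
                rw [seqAFor, dif_pos hL, if_neg hm, hnone]
          · rw [seqAFor, dif_neg hL, seqAFor, dif_neg (by omega)]
        rw [step]
        exact ih c res (i₀ + 1) i (by omega) (by omega) hinv

theorem seqAB2 (org : List Int) : ∀ (f k : Nat) (cs : List Int) (res : List (Int × Int)) (i : Nat),
    Inv2 org cs i → org.length - i ≤ k → org.length - 1 - i ≤ f →
    seqAFor f org cs res i = (bFold org cs res i).2 := by
  intro f
  induction f with
  | zero =>
      intro k cs res i _ _ hf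
      rw [seqAFor, dif_neg (by omega), bFold_stop org cs res i (by omega)]
  | succ f ihf =>
      intro k
      induction k with
      | zero =>
          intro cs res i _ hk _
          rw [seqAFor, dif_neg (by omega), bFold_stop org cs res i (by omega)]
      | succ k ihk =>
          intro cs res i hinv hk hf
          by_cases hL : i + 1 < org.length
          · rw [seqAFor, dif_pos hL, bFold_step org cs res i hL, altStep_eq]
            by_cases hm : org.getD i 0 = cs.getD i 0
            · rw [if_pos hm, if_pos hm]
              have hinv' : Inv2 org cs (i + 1) := by
                refine ⟨invP_succ_of_match hinv.1 hm, ?_⟩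
                rcases hinv.2 with h1 | ⟨hn, hq⟩
                · exact Or.inl h1
                · exact Or.inr ⟨hn, minv_match hn hL hq hm⟩
              exact ihk cs res (i + 1) hinv' (by omega) (by omega)
            · rw [if_neg hm, if_neg hm]
              have hWH : org.length ≤ cs.length ∨ org.getD i 0 ∈ cs.drop (i + 1) := by
                rcases hinv.2 with h1 | ⟨hn, hq⟩
                · exact Or.inl h1
                · exact Or.inr (minv_mem hn hL hq hm)
              have hfind := seqFind_eq_window org cs (org.getD i 0)
                (org.length - (i + 1)) (i + 1) le_rfl hWH
              cases hidx : PySem.List.index?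
                  ((cs.drop (i + 1)).take (org.length - (i + 1))) (org.getD i 0) with
              | none =>
                  have hfn : seqFind org cs (org.getD i 0) (i + 1) = none := by
                    rw [hfind, hidx]; rfl
                  have hinv' : Inv2 org cs (i + 1) := by
                    refine ⟨invP_succ_of_none hinv.1 hfn, ?_⟩
                    rcases hinv.2 with h1 | ⟨hn, hq⟩
                    · exact Or.inl h1
                    · exfalso
                      have hmem := minv_mem hn hL hq hm
                      have hall : (cs.drop (i + 1)).take (org.length - (i + 1))
                          = cs.drop (i + 1) :=
                        List.take_of_length_le (by simp [List.length_drop]; omega)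
                      rw [hall] at hidx
                      exact (PySem.List.index?_eq_none_iff _ _).mp hidx hmem
                  simp only [hfn, hidx]
                  exact ihk cs res (i + 1) hinv' (by omega) (by omega)
              | some t =>
                  have hfs : seqFind org cs (org.getD i 0) (i + 1) = some (i + 1 + t) := by
                    rw [hfind, hidx]; rfl
                  obtain ⟨htW, hWt, -⟩ := PySem.List.getElem_of_index?_eq_some hidx
                  have htb : t < org.length - (i + 1) ∧ t < cs.length - (i + 1) := by
                    have := htW
                    simp [List.length_take, List.length_drop] at this
                    omega
                  have hjc : i + 1 + t < cs.length := by omega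
                  have hcj : cs.getD (i + 1 + t) 0 = org.getD i 0 := by
                    have h1 : ((cs.drop (i + 1)).take (org.length - (i + 1)))[t]'htW
                        = (cs.drop (i + 1))[t]'(by simp [List.length_drop]; omega) :=
                      List.getElem_take
                    have h2 : (cs.drop (i + 1))[t]'(by simp [List.length_drop]; omega)
                        = cs[i + 1 + t]'hjc := List.getElem_drop
                    rw [List.getD_eq_getElem cs 0 hjc, ← h2, ← h1, hWt]
                  have hres : res ++ emitF i (i + 1 + t)
                        ++ (if 1 < i + 1 + t then emitR i (i + 1 + t) else [])
                      = res ++ emitF i (i + 1 + t) ++ emitR i (i + 1 + t) := by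
                    by_cases h1 : 1 < i + 1 + t
                    · rw [if_pos h1]
                    · rw [if_neg h1, emitR_eq_nil (by omega) (by omega), List.append_nil]
                  have hinvP' : InvP org (swapKM cs i (i + 1 + t)) (i + 1) := by
                    rcases hinv.2 with h1 | ⟨hn, hq⟩
                    · exact invP_succ_of_swap hinv.1 h1 hfs
                    · exact invP_of_prefix (minv_swap hn hL (by omega) hjc hq hcj).1
                  have hinv2' : Inv2 org (swapKM cs i (i + 1 + t)) (i + 1) := by
                    refine ⟨hinvP', ?_⟩
                    rcases hinv.2 with h1 | ⟨hn, hq⟩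
                    · left; rw [length_swapKM]; exact h1
                    · exact Or.inr ⟨by rw [length_swapKM]; exact hn,
                        minv_swap hn hL (by omega) hjc hq hcj⟩
                  simp only [hfs, hidx]
                  rw [hres]
                  rw [seqA_skip f org org.length (swapKM cs i (i + 1 + t)) _ 0 (i + 1)
                    (by omega) (by omega) hinvP']
                  exact ihf org.length (swapKM cs i (i + 1 + t)) _ (i + 1) hinv2'
                    (by omega) (by omega)
          · rw [seqAFor, dif_neg hL, bFold_stop org cs res i hL]

-- ===== VERDICT (by name: the statement is the Claim_ definition above) =====
theorem sequenc_spec : Claim_equal_sequenc := by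
  intro org chg res _ hpre
  unfold Spec_sequenc sequenc sequenc_alt
  have h0 : Inv2 org chg 0 := by
    refine ⟨fun i' hi' => absurd hi' (Nat.not_lt_zero i'), ?_⟩
    rcases hpre with h | ⟨hl, hm⟩
    · exact Or.inl h
    · refine Or.inr ⟨hl, fun i' hi' => absurd hi' (Nat.not_lt_zero i'), ?_⟩
      simpa [List.drop_zero, hl] using hm
  have := seqAB2 org org.length org.length chg res 0 h0 (by omega) (by omega)
  rw [this]
  unfold bFold
  rw [List.range_eq_range']
  rfl
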